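-- pv_equiv track=rewrite | github.com/Ayanami1314/swe-pruner | downstream_eval/single_turn/hard_code_pruner/downstream_task/model.py | _kept_frags_to_code
-- ===== SOURCE A (Python) =====
-- from typing import Protocol, List
--
-- def _kept_frags_to_code(kept_frags: List[int], origin_code: str) -> str:
--     lines = origin_code.splitlines()
--     kept_lines = sorted(list(set(kept_frags)))
--
--     # Fill single line gaps
--     extra_kept_lines = []
--     for idx, k in enumerate(kept_lines):
--         if idx > 0 and k - kept_lines[idx - 1] == 2:
--             extra_kept_lines.append(k - 1)
--     kept_lines.extend(extra_kept_lines)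
--     kept_lines = sorted(list(set(kept_lines)))
--
--     kept_code_lines = []
--     filtered_lines_cnt = 0
--     filtered_char_cnt = 0
--     s_format = "(filtered {} lines)"
--
--     for line in range(1, len(lines) + 1):
--         if lines[line - 1].strip() == "":
--             filtered_lines_cnt += 1
--             continue
--
--         if line not in kept_lines:
--             filtered_lines_cnt += 1
--             filtered_char_cnt += len(lines[line - 1])
--         else:
--             if filtered_lines_cnt > 0:
--                 baseline_length = len(s_format.format(0))
--                 if filtered_char_cnt > baseline_length:
--                     kept_code_lines.append(s_format.format(filtered_lines_cnt))
--                 else: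
--                     for j in range(filtered_lines_cnt, 0, -1):
--                         kept_code_lines.append(lines[line - j - 1])
--                 filtered_lines_cnt = 0
--                 filtered_char_cnt = 0
--             kept_code_lines.append(lines[line - 1])
--
--     if filtered_lines_cnt > 0:
--         kept_code_lines.append(s_format.format(filtered_lines_cnt))
--
--     return "\n".join(kept_code_lines)
-- ===== SOURCE B (Python) =====
-- from typing import List
--
--
-- def _kept_frags_to_code(kept_frags: List[int], origin_code: str) -> str:
--     lines = origin_code.splitlines()
--
--     # gap-filled kept set: sorted distinct kept lines, plus the middle line of
--     # every single-line gap (consecutive kept lines exactly 2 apart)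
--     kept = set(kept_frags)
--     s = sorted(kept)
--     for a, b in zip(s, s[1:]):
--         if b - a == 2:
--             kept.add(b - 1)
--
--     # tag every line: output-kept iff non-blank AND its 1-based index is kept
--     tagged = [(line.strip() != "" and i in kept, line)
--               for i, line in enumerate(lines, 1)]
--
--     # group consecutive equally-tagged lines into runs
--     runs = []
--     for k, line in tagged:
--         if runs and runs[-1][0] == k:
--             runs[-1][1].append(line)
--         else:
--             runs.append((k, [line]))
--
--     # emit: kept runs verbatim; filtered runs collapsed when their non-blank
--     # char total exceeds 18 or when the run is trailing, else restored verbatim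
--     out = []
--     for pos, (k, ls) in enumerate(runs):
--         if k:
--             out.extend(ls)
--         elif pos == len(runs) - 1 or sum(len(l) for l in ls if l.strip() != "") > 18:
--             out.append("(filtered {} lines)".format(len(ls)))
--         else:
--             out.extend(ls)
--     return "\n".join(out)
-- ===== Notes on version B (the rewrite author's own statement) =====
-- stated objective: alternative
-- what changed: A threads mutable counters (filtered line/char counts) through a single index loop that re-reads lines by index to restore a gap; B instead tags each line kept/filtered, materializes explicit runs of consecutive equally-tagged lines, and then emits each run whole (verbatim, collapsed, or restored), with no counters and no back-indexing.
import Mathlib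
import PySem

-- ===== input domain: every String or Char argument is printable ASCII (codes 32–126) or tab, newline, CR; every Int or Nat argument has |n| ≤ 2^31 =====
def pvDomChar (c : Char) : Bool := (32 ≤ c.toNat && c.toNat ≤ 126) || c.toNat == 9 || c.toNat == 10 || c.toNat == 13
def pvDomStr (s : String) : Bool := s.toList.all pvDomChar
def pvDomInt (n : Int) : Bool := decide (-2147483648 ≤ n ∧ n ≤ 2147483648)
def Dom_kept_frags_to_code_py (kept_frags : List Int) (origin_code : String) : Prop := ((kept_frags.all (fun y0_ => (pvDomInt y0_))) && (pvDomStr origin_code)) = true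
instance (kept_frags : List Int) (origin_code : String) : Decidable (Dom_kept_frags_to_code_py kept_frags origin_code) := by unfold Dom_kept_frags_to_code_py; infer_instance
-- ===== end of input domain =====

-- B replaces A's counter-threading index loop (with back-indexing restores) by an
-- explicit tag/group-into-runs/emit-runs pipeline; alternative decomposition, same cost class.

-- ===== PORT A =====

-- "(filtered {} lines)".format(n)
def pvFmtA (n : Int) : String := String.ofList ("(filtered ".toList ++ PySem.Int.toChars n ++ " lines)".toList)

-- kept_lines = sorted(set(kept_frags)) + single-line-gap fill, A's way (list + enumerate + index lookback)
def pvKeptA (kept_frags : List Int) : List Int :=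
  let kl := PySem.List.sorted (PySem.Set.ofList kept_frags) (fun x => x) false
  let extras := (PySem.List.enumerate kl 0).foldl
    (fun ex p => if p.1 > 0 && (p.2 - PySem.List.pyGetD kl (p.1 - 1) 0 == 2) then ex ++ [p.2 - 1] else ex) []
  PySem.List.sorted (PySem.Set.ofList (kl ++ extras)) (fun x => x) false

-- body of A's `for line in range(1, len(lines)+1)` loop
def pvAStep (lines : List String) (kept_lines : List Int)
    (st : List String × Int × Int) (line : Int) : List String × Int × Int :=
  match st with
  | (acc, cnt, char) =>
  let cur := PySem.List.pyGetD lines (line - 1) ""   -- lines[line-1]; always in range here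
  if PySem.Str.strip cur = "" then (acc, cnt + 1, char)
  else if !(kept_lines.contains line) then (acc, cnt + 1, char + PySem.Str.len cur)
  else
    let st2 :=
      if cnt > 0 then
        ((if char > PySem.Str.len (pvFmtA 0) then acc ++ [pvFmtA cnt]
          else (PySem.List.pyRange cnt 0 (-1)).foldl
            (fun a j => a ++ [PySem.List.pyGetD lines (line - j - 1) ""]) acc), (0 : Int), (0 : Int))
      else (acc, cnt, char)
    (st2.1 ++ [cur], st2.2.1, st2.2.2)

def kept_frags_to_code_py (kept_frags : List Int) (origin_code : String) : String :=
  let lines := PySem.Str.splitlines origin_code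
  let kept_lines := pvKeptA kept_frags
  let st := (PySem.List.pyRange 1 ((lines.length : Int) + 1) 1).foldl (pvAStep lines kept_lines) ([], 0, 0)
  let acc := if st.2.1 > 0 then st.1 ++ [pvFmtA st.2.1] else st.1
  PySem.Str.join "\n" acc

-- ===== PORT B =====

def pvFmtB (n : Int) : String := String.ofList ("(filtered ".toList ++ PySem.Int.toChars n ++ " lines)".toList)

-- gap-filled kept set, B's way (set + zip of adjacent sorted pairs)
def pvKeptB (kept_frags : List Int) : PySem.Set Int :=
  let s0 := PySem.Set.ofList kept_frags
  let s := PySem.List.sorted s0 (fun x => x) false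
  (s.zip s.tail).foldl (fun k p => if p.2 - p.1 == 2 then PySem.Set.add k (p.2 - 1) else k) s0

def pvBlank (l : String) : Bool := PySem.Str.strip l = ""

def pvTag (kept : PySem.Set Int) (i : Int) (l : String) : Bool :=
  !pvBlank l && PySem.Set.contains kept i

-- add one tagged line on the front of a run list (grouping step)
def pvConsRun (k : Bool) (l : String) : List (Bool × List String) → List (Bool × List String)
  | [] => [(k, [l])]
  | (k', ls) :: rs => if k == k' then (k, l :: ls) :: rs else (k, [l]) :: (k', ls) :: rs

def pvGroup : List (Bool × String) → List (Bool × List String)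
  | [] => []
  | (k, l) :: rest => pvConsRun k l (pvGroup rest)

-- char total of a filtered run: lengths of its non-blank lines only
def pvCharSum (ls : List String) : Int :=
  (ls.filter (fun l => !pvBlank l)).foldl (fun a l => a + PySem.Str.len l) 0

-- emit runs; a trailing filtered run is always collapsed
def pvProc : List (Bool × List String) → List String
  | [] => []
  | [(k, ls)] => if k then ls else [pvFmtB (ls.length : Int)]
  | (k, ls) :: r :: rs =>
      (if k then ls else if pvCharSum ls > 18 then [pvFmtB (ls.length : Int)] else ls) ++ pvProc (r :: rs)

def kept_frags_to_code_py_alt (kept_frags : List Int) (origin_code : String) : String :=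
  let lines := PySem.Str.splitlines origin_code
  let kept := pvKeptB kept_frags
  let tagged := (PySem.List.enumerate lines 1).map (fun p => (pvTag kept p.1 p.2, p.2))
  PySem.Str.join "\n" (pvProc (pvGroup tagged))

-- ===== PRECONDITION & SPEC =====
def Spec_kept_frags_to_code_py (kept_frags : List Int) (origin_code : String) (out : String) : Prop := out = kept_frags_to_code_py_alt kept_frags origin_code
instance (kept_frags : List Int) (origin_code : String) (out : String) : Decidable (Spec_kept_frags_to_code_py kept_frags origin_code out) := by unfold Spec_kept_frags_to_code_py; infer_instance

-- ===== CLAIM (what is proved, stated in full; the proofs are below) =====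
def Claim_equal_kept_frags_to_code_py : Prop := ∀ (kept_frags : List Int) (origin_code : String), Dom_kept_frags_to_code_py kept_frags origin_code → Spec_kept_frags_to_code_py kept_frags origin_code (kept_frags_to_code_py kept_frags origin_code)


-- ===== LEMMAS AND PROOFS =====

theorem pvFmt_eq : pvFmtA = pvFmtB := rfl

theorem pv_baseline : PySem.Str.len (pvFmtA 0) = 18 := by decide

-- spec walker over tagged lines, with the pending filtered run explicit
def pvGo (pend : List String) : List (Bool × String) → List String
  | [] => if pend.isEmpty then [] else [pvFmtB (pend.length : Int)]
  | (t, l) :: rest =>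
    if t then
      (if pend.isEmpty then [] else if pvCharSum pend > 18 then [pvFmtB (pend.length : Int)] else pend)
        ++ l :: pvGo [] rest
    else pvGo (pend ++ [l]) rest

def pvPrepend (pend : List String) (runs : List (Bool × List String)) : List (Bool × List String) :=
  if pend.isEmpty then runs else
    match runs with
    | (false, ls) :: rs => (false, pend ++ ls) :: rs
    | rs => (false, pend) :: rs

theorem pvConsRun_ne_nil (k : Bool) (l : String) (G : List (Bool × List String)) :
    pvConsRun k l G ≠ [] := by
  match G with
  | [] => simp [pvConsRun]
  | (k', ls) :: rs => simp only [pvConsRun]; split <;> simp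

theorem pvProc_consTrue (l : String) (G : List (Bool × List String)) :
    pvProc (pvConsRun true l G) = l :: pvProc G := by
  match G with
  | [] => simp [pvConsRun, pvProc]
  | (k', ls) :: rs => cases k' <;> cases rs <;> simp [pvConsRun, pvProc]

theorem pvPrepend_consFalse (pend : List String) (l : String) (G : List (Bool × List String)) :
    pvPrepend pend (pvConsRun false l G) = pvPrepend (pend ++ [l]) G := by
  match G with
  | [] => cases pend <;> simp [pvConsRun, pvPrepend]
  | (k', ls) :: rs => cases k' <;> cases pend <;> simp [pvConsRun, pvPrepend]

theorem pvProc_prepend_consTrue (pend : List String) (l : String) (G : List (Bool × List String)) :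
    pvProc (pvPrepend pend (pvConsRun true l G)) =
      (if pend.isEmpty then [] else if pvCharSum pend > 18 then [pvFmtB (pend.length : Int)] else pend)
        ++ l :: pvProc G := by
  cases pend with
  | nil => simp [pvPrepend, pvProc_consTrue]
  | cons p ps =>
    have h1 : pvPrepend (p :: ps) (pvConsRun true l G) = (false, p :: ps) :: pvConsRun true l G := by
      match G with
      | [] => simp [pvPrepend, pvConsRun]
      | (k', ls) :: rs => cases k' <;> simp [pvPrepend, pvConsRun]
    rw [h1]
    cases hG : pvConsRun true l G with
    | nil => exact absurd hG (pvConsRun_ne_nil _ _ _)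
    | cons a as =>
      rw [show pvProc ((false, p :: ps) :: a :: as)
            = (if pvCharSum (p :: ps) > 18 then [pvFmtB ((p :: ps).length : Int)] else (p :: ps)) ++ pvProc (a :: as) from by
          simp [pvProc]]
      rw [← hG, pvProc_consTrue]
      simp

theorem pvGo_spec (tagged : List (Bool × String)) : ∀ pend : List String,
    pvGo pend tagged = pvProc (pvPrepend pend (pvGroup tagged)) := by
  induction tagged with
  | nil =>
    intro pend
    cases pend <;> simp [pvGo, pvGroup, pvPrepend, pvProc]
  | cons hd rest ih =>
    obtain ⟨t, l⟩ := hd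
    intro pend
    cases t with
    | false =>
      rw [show pvGo pend ((false, l) :: rest) = pvGo (pend ++ [l]) rest from by simp [pvGo], ih,
        show pvGroup ((false, l) :: rest) = pvConsRun false l (pvGroup rest) from rfl,
        pvPrepend_consFalse]
    | true =>
      rw [show pvGo pend ((true, l) :: rest)
            = (if pend.isEmpty then [] else if pvCharSum pend > 18 then [pvFmtB (pend.length : Int)] else pend)
              ++ l :: pvGo [] rest from by simp [pvGo], ih,
        show pvGroup ((true, l) :: rest) = pvConsRun true l (pvGroup rest) from rfl,
        pvProc_prepend_consTrue]
      simp [pvPrepend]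

-- A-side tagging of the suffix still to process
def pvTagA (kept : List Int) (i : Int) (l : String) : Bool := !pvBlank l && kept.contains i

def pvTagged (kept : List Int) (s : Int) (suf : List String) : List (Bool × String) :=
  (PySem.List.enumerate suf (s + 1)).map (fun p => (pvTagA kept p.1 p.2, p.2))

theorem pvTagged_cons (kept : List Int) (s : Int) (l : String) (suf : List String) :
    pvTagged kept s (l :: suf) = (pvTagA kept (s + 1) l, l) :: pvTagged kept (s + 1) suf := by
  simp [pvTagged, PySem.List.enumerate_cons]

theorem pv_get_mid {α : Type} (xs ys : List α) (l : α) (zs : List α) (d : α) :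
    PySem.List.pyGetD (xs ++ ys ++ l :: zs) ((xs.length + ys.length : Nat) : Int) d = l := by
  rw [PySem.List.pyGetD_natCast]
  rw [List.getD_eq_getElem?_getD, List.append_assoc, List.getElem?_append_right (by omega)]
  rw [List.getElem?_append_right (by omega)]
  simp

theorem pvCharSum_append (xs : List String) (l : String) :
    pvCharSum (xs ++ [l]) = pvCharSum xs + (if pvBlank l then 0 else PySem.Str.len l) := by
  by_cases h : pvBlank l = true <;>
    simp [pvCharSum, List.filter_append, List.foldl_append, h]

theorem pv_restore (pend : List String) : ∀ (pref rest acc : List String),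
    (PySem.List.pyRange ((pend.length : Int)) 0 (-1)).foldl
      (fun a j => a ++ [PySem.List.pyGetD (pref ++ pend ++ rest) (((pref.length + pend.length : Nat) : Int) + 1 - j - 1) ""]) acc
    = acc ++ pend := by
  induction pend with
  | nil =>
    intro pref rest acc
    simp [PySem.List.pyRange_neg_one_eq_nil]
  | cons p t ih =>
    intro pref rest acc
    rw [PySem.List.pyRange_neg_one_cons (by simp)]
    rw [List.foldl_cons]
    have hidx : (((pref.length + (p :: t).length : Nat) : Int) + 1 - ((p :: t).length : Int) - 1)
        = ((pref.length + (0 : Nat) : Nat) : Int) := by push_cast; ring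
    have hget : PySem.List.pyGetD (pref ++ p :: t ++ rest)
        (((pref.length + (p :: t).length : Nat) : Int) + 1 - ((p :: t).length : Int) - 1) "" = p := by
      rw [hidx, show pref ++ p :: t ++ rest = pref ++ [] ++ p :: (t ++ rest) by simp]
      exact pv_get_mid pref [] p (t ++ rest) ""
    rw [hget]
    have hrange : ((((p :: t).length : Nat) : Int) - 1) = ((t.length : Nat) : Int) := by
      simp
    rw [hrange]
    have hfun : (fun (a : List String) (j : Int) => a ++ [PySem.List.pyGetD (pref ++ p :: t ++ rest)
          (((pref.length + (p :: t).length : Nat) : Int) + 1 - j - 1) ""])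
        = (fun (a : List String) (j : Int) => a ++ [PySem.List.pyGetD ((pref ++ [p]) ++ t ++ rest)
          ((((pref ++ [p]).length + t.length : Nat) : Int) + 1 - j - 1) ""]) := by
      funext a j
      have h1 : pref ++ p :: t ++ rest = (pref ++ [p]) ++ t ++ rest := by simp
      have h2 : (((pref.length + (p :: t).length : Nat) : Int)) + 1 - j - 1
          = (((pref ++ [p]).length + t.length : Nat) : Int) + 1 - j - 1 := by
        simp; omega
      rw [h1, h2]
    rw [hfun, ih (pref ++ [p]) rest (acc ++ [p])]
    simp

def pvAFin (st : List String × Int × Int) : List String :=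
  if st.2.1 > 0 then st.1 ++ [pvFmtA st.2.1] else st.1

theorem pvAFold_spec (kept : List Int) : ∀ (suf pref pend acc : List String),
    pvAFin ((PySem.List.pyRange (((pref.length + pend.length : Nat) : Int) + 1)
        (((pref ++ pend ++ suf).length : Int) + 1) 1).foldl
      (pvAStep (pref ++ pend ++ suf) kept) (acc, (pend.length : Int), pvCharSum pend))
    = acc ++ pvGo pend (pvTagged kept ((pref.length + pend.length : Nat) : Int) suf) := by
  intro suf
  induction suf with
  | nil =>
    intro pref pend acc
    rw [PySem.List.pyRange_one_eq_nil (by simp)]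
    rw [show pvTagged kept ((pref.length + pend.length : Nat) : Int) [] = [] from by
      simp [pvTagged, PySem.List.enumerate]]
    cases pend with
    | nil => simp [pvAFin, pvGo]
    | cons p t =>
      simp only [List.foldl_nil, pvAFin]
      rw [if_pos (show ((p :: t).length : Int) > 0 from by simp)]
      simp [pvGo, pvFmt_eq]
  | cons l suf' ih =>
    intro pref pend acc
    have hlt : (((pref.length + pend.length : Nat) : Int) + 1) < (((pref ++ pend ++ l :: suf').length : Int) + 1) := by
      simp
    rw [PySem.List.pyRange_one_cons hlt, List.foldl_cons]
    have hcur : PySem.List.pyGetD (pref ++ pend ++ l :: suf')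
        ((((pref.length + pend.length : Nat) : Int) + 1) - 1) "" = l := by
      rw [show ((((pref.length + pend.length : Nat) : Int) + 1) - 1) = ((pref.length + pend.length : Nat) : Int) by ring]
      exact pv_get_mid pref pend l suf' ""
    rw [pvTagged_cons]
    by_cases hb : PySem.Str.strip l = ""
    · -- blank line: filtered, char count unchanged
      have hstep : pvAStep (pref ++ pend ++ l :: suf') kept (acc, (pend.length : Int), pvCharSum pend)
          (((pref.length + pend.length : Nat) : Int) + 1)
          = (acc, (pend.length : Int) + 1, pvCharSum pend) := by
        simp only [pvAStep]
        rw [hcur, if_pos hb]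
      rw [hstep]
      have htag : pvTagA kept (((pref.length + pend.length : Nat) : Int) + 1) l = false := by
        simp [pvTagA, pvBlank, hb]
      rw [htag, show pvGo pend ((false, l) :: pvTagged kept (((pref.length + pend.length : Nat) : Int) + 1) suf')
        = pvGo (pend ++ [l]) (pvTagged kept (((pref.length + pend.length : Nat) : Int) + 1) suf') from by simp [pvGo]]
      have H := ih pref (pend ++ [l]) acc
      rw [pvCharSum_append] at H
      simp only [List.append_assoc, List.singleton_append, List.length_append, List.length_cons,
        List.length_nil, pvBlank, hb, decide_true, if_true, add_zero] at H ⊢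
      rw [show ((pref.length + (pend.length + 1) : Nat) : Int) = ((pref.length + pend.length : Nat) : Int) + 1 by push_cast; ring,
        show ((pend.length + 1 : Nat) : Int) = ((pend.length : Nat) : Int) + 1 by push_cast; ring] at H
      exact H
    · by_cases hk : List.contains kept (((pref.length + pend.length : Nat) : Int) + 1) = true
      · -- kept line: flush pending run, emit the line
        have htag : pvTagA kept (((pref.length + pend.length : Nat) : Int) + 1) l = true := by
          simp only [pvTagA, pvBlank]
          rw [hk, decide_eq_false hb]
          simp
        rw [htag]
        rw [show pvGo pend ((true, l) :: pvTagged kept (((pref.length + pend.length : Nat) : Int) + 1) suf')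
          = (if pend.isEmpty then [] else if pvCharSum pend > 18 then [pvFmtB (pend.length : Int)] else pend)
            ++ l :: pvGo [] (pvTagged kept (((pref.length + pend.length : Nat) : Int) + 1) suf') from by simp [pvGo]]
        have hstep : pvAStep (pref ++ pend ++ l :: suf') kept (acc, (pend.length : Int), pvCharSum pend)
            (((pref.length + pend.length : Nat) : Int) + 1)
            = ((acc ++ (if pend.isEmpty then [] else if pvCharSum pend > 18 then [pvFmtB (pend.length : Int)] else pend)) ++ [l], 0, 0) := by
          cases pend with
          | nil =>
            simp only [pvAStep]
            rw [hcur, if_neg hb, hk]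
            simp [pvCharSum]
          | cons p t =>
            have hres := pv_restore (p :: t) pref (l :: suf') acc
            simp only [pvAStep]
            rw [hcur, if_neg hb, hk]
            simp only [Bool.not_true, Bool.false_eq_true, if_false, pv_baseline]
            rw [if_pos (show ((p :: t).length : Int) > 0 from by simp)]
            by_cases hc : pvCharSum (p :: t) > 18
            · rw [if_pos hc]
              simp [hc, pvFmt_eq]
            · rw [if_neg hc, hres]
              simp [hc]
        rw [hstep]
        have H := ih (pref ++ pend ++ [l]) [] (acc ++ (if pend.isEmpty then [] else if pvCharSum pend > 18 then [pvFmtB (pend.length : Int)] else pend) ++ [l])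
        rw [show pvCharSum [] = 0 from rfl] at H
        simp only [List.append_assoc, List.append_nil, List.singleton_append,
          List.length_append, List.length_cons, List.length_nil, add_zero, Nat.cast_zero] at H ⊢
        rw [show ((pref.length + (pend.length + 1) : Nat) : Int) = ((pref.length + pend.length : Nat) : Int) + 1 by push_cast; ring] at H
        rw [H]
      · -- non-blank, not kept: filtered, char count grows
        have hk' : List.contains kept (((pref.length + pend.length : Nat) : Int) + 1) = false := by
          rwa [Bool.not_eq_true] at hk
        have hstep : pvAStep (pref ++ pend ++ l :: suf') kept (acc, (pend.length : Int), pvCharSum pend)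
            (((pref.length + pend.length : Nat) : Int) + 1)
            = (acc, (pend.length : Int) + 1, pvCharSum pend + PySem.Str.len l) := by
          simp only [pvAStep]
          rw [hcur, if_neg hb, hk']
          simp
        rw [hstep]
        have htag : pvTagA kept (((pref.length + pend.length : Nat) : Int) + 1) l = false := by
          simp only [pvTagA]
          rw [hk']
          simp
        rw [htag, show pvGo pend ((false, l) :: pvTagged kept (((pref.length + pend.length : Nat) : Int) + 1) suf')
          = pvGo (pend ++ [l]) (pvTagged kept (((pref.length + pend.length : Nat) : Int) + 1) suf') from by simp [pvGo]]
        have H := ih pref (pend ++ [l]) acc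
        rw [pvCharSum_append] at H
        simp only [List.append_assoc, List.singleton_append, List.length_append, List.length_cons,
          List.length_nil, pvBlank, hb, decide_false] at H ⊢
        rw [show ((pref.length + (pend.length + 1) : Nat) : Int) = ((pref.length + pend.length : Nat) : Int) + 1 by push_cast; ring,
          show ((pend.length + 1 : Nat) : Int) = ((pend.length : Nat) : Int) + 1 by push_cast; ring] at H
        exact H

-- gap-fill extras: A's enumerate/lookback fold equals the adjacent-pairs fold
theorem pv_extras_aux (full : List Int) : ∀ (t : List Int) (s : Nat) (prev : Int) (ex : List Int),
    1 ≤ s → full.drop (s - 1) = prev :: t →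
    (PySem.List.enumerate t (s : Int)).foldl
      (fun ex p => if p.1 > 0 && (p.2 - PySem.List.pyGetD full (p.1 - 1) 0 == 2) then ex ++ [p.2 - 1] else ex) ex
    = ((prev :: t).zip t).foldl (fun ex p => if p.2 - p.1 == 2 then ex ++ [p.2 - 1] else ex) ex := by
  intro t
  induction t with
  | nil => intro s prev ex hs hd; simp
  | cons b t' ih =>
    intro s prev ex hs hd
    rw [PySem.List.enumerate_cons, List.foldl_cons]
    have hsome : full[s - 1]? = some prev := by
      have h0 := congrArg (fun l : List Int => l[0]?) hd
      simpa using h0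
    have hprev : PySem.List.pyGetD full ((s : Int) - 1) 0 = prev := by
      rw [show ((s : Int) - 1) = ((s - 1 : Nat) : Int) by omega, PySem.List.pyGetD_natCast]
      rw [List.getD_eq_getElem?_getD, hsome]
      rfl
    have hcond : (decide ((s : Int) > 0) && (b - PySem.List.pyGetD full ((s : Int) - 1) 0 == 2))
        = (b - prev == 2) := by
      rw [hprev]
      simp only [show ((s : Int) > 0) = True by simp; omega, decide_true, Bool.true_and]
    have hdrop : full.drop ((s + 1) - 1) = b :: t' := by
      have h2 := congrArg (List.drop 1) hd
      rw [List.drop_drop] at h2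
      rw [show (s + 1) - 1 = 1 + (s - 1) by omega]
      rw [show (1 : Nat) + (s - 1) = s - 1 + 1 by omega, h2]
      simp
    have := ih (s + 1) b (if b - prev == 2 then ex ++ [b - 1] else ex) (by omega) hdrop
    rw [show ((s : Int) + 1) = (((s + 1 : Nat)) : Int) by push_cast; ring] at *
    simp only [hcond]
    rw [this]
    simp

theorem pv_extras_eq (s : List Int) :
    (PySem.List.enumerate s 0).foldl
      (fun ex p => if p.1 > 0 && (p.2 - PySem.List.pyGetD s (p.1 - 1) 0 == 2) then ex ++ [p.2 - 1] else ex) []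
    = (s.zip s.tail).foldl (fun ex p => if p.2 - p.1 == 2 then ex ++ [p.2 - 1] else ex) [] := by
  cases s with
  | nil => simp
  | cons a t =>
    rw [PySem.List.enumerate_cons, List.foldl_cons]
    have h0 : ((0 : Int) > 0) = False := by simp
    simp only [h0, decide_false, Bool.false_and]
    have := pv_extras_aux (a :: t) t 1 a [] (le_refl 1) (by simp)
    simpa using this

theorem pv_mem_appfold {α β : Type} (c : β → Bool) (v : β → α) (L : List β) :
    ∀ (init : List α) (x : α),
    x ∈ L.foldl (fun ex p => if c p then ex ++ [v p] else ex) init ↔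
      x ∈ init ∨ ∃ p ∈ L, c p = true ∧ x = v p := by
  induction L with
  | nil => intro init x; simp
  | cons q L ih =>
    intro init x
    rw [List.foldl_cons, ih]
    by_cases hq : c q = true <;> simp [hq] <;> tauto

theorem pv_mem_addfold {β : Type} (c : β → Bool) (v : β → Int) (L : List β) :
    ∀ (init : PySem.Set Int) (x : Int),
    x ∈ L.foldl (fun k p => if c p then PySem.Set.add k (v p) else k) init ↔
      x ∈ init ∨ ∃ p ∈ L, c p = true ∧ x = v p := by
  induction L with
  | nil => intro init x; simp
  | cons q L ih =>
    intro init x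
    rw [List.foldl_cons, ih]
    by_cases hq : c q = true <;> simp [hq, PySem.Set.mem_add] <;> tauto

theorem pv_contains_eq (kf : List Int) (x : Int) :
    (pvKeptA kf).contains x = PySem.Set.contains (pvKeptB kf) x := by
  rw [Bool.eq_iff_iff, PySem.Set.contains_iff]
  rw [show (pvKeptA kf).contains x = List.contains (pvKeptA kf) x from rfl]
  rw [List.contains_iff_mem]
  simp only [pvKeptA, pvKeptB]
  rw [PySem.List.mem_sorted, PySem.Set.mem_ofList, List.mem_append, pv_extras_eq,
    pv_mem_appfold, pv_mem_addfold, PySem.List.mem_sorted, PySem.Set.mem_ofList]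
  simp only [List.not_mem_nil, false_or]

-- ===== VERDICT (by name: the statement is the Claim_ definition above) =====
theorem kept_frags_to_code_py_spec : Claim_equal_kept_frags_to_code_py := by
  unfold Claim_equal_kept_frags_to_code_py
  intro kf oc _
  unfold Spec_kept_frags_to_code_py
  simp only [kept_frags_to_code_py, kept_frags_to_code_py_alt]
  have hA := pvAFold_spec (pvKeptA kf) (PySem.Str.splitlines oc) [] [] []
  rw [show pvCharSum [] = (0 : Int) from rfl] at hA
  simp only [pvAFin, List.nil_append, List.length_nil, Nat.cast_zero, zero_add] at hA
  rw [hA, pvGo_spec]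
  rw [show pvPrepend [] (pvGroup (pvTagged (pvKeptA kf) 0 (PySem.Str.splitlines oc)))
      = pvGroup (pvTagged (pvKeptA kf) 0 (PySem.Str.splitlines oc)) from by simp [pvPrepend]]
  have hT : pvTagged (pvKeptA kf) 0 (PySem.Str.splitlines oc)
      = (PySem.List.enumerate (PySem.Str.splitlines oc) 1).map
          (fun p => (pvTag (pvKeptB kf) p.1 p.2, p.2)) := by
    unfold pvTagged
    rw [show ((0 : Int) + 1) = 1 by ring]
    apply List.map_congr_left
    intro p _
    simp only [pvTagA, pvTag]
    rw [pv_contains_eq]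
  rw [hT]
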